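-- pv_equiv track=rewrite | github.com/AlexGreason/iqpx | velocities.py | xgcd_l2
-- ===== SOURCE A (Python) =====
-- def xgcd(b, n):
--     '''
--     Extended Euclidean algorithm:
--     '''
--     x0, x1, y0, y1 = 1, 0, 0, 1
--     while n != 0:
--         q, b, n = b // n, n, b % n
--         x0, x1 = x1, x0 - q * x1
--         y0, y1 = y1, y0 - q * y1
--     return (b, x0, y0) if (b > 0) else (-b, -x0, -y0)
--
-- def xgcd_l2(a, b):
--     '''
--     Find (g, x, y) such that ax + by = g = gcd(a, b), with (x, y) chosen to
--     minimise the l2 norm: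
--     '''
--     g, x, y = xgcd(a, b)
--     while (x ** 2 + y ** 2 > (x - b) ** 2 + (y + a) ** 2):
--         x -= b
--         y += a
--     while (x ** 2 + y ** 2 > (x + b) ** 2 + (y - a) ** 2):
--         x += b
--         y -= a
--     return (g, x, y)
-- ===== SOURCE B (Python) =====
-- def xgcd(b, n):
--     '''
--     Extended Euclidean algorithm:
--     '''
--     x0, x1, y0, y1 = 1, 0, 0, 1
--     while n != 0:
--         q, b, n = b // n, n, b % n
--         x0, x1 = x1, x0 - q * x1
--         y0, y1 = y1, y0 - q * y1
--     return (b, x0, y0) if (b > 0) else (-b, -x0, -y0)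
--
-- def xgcd_l2(a, b):
--     '''
--     Find (g, x, y) with ax + by = g = gcd(a, b) and (x, y) of minimal l2 norm,
--     by a closed-form rounding instead of the step-by-step adjustment loops.
--     '''
--     g, x, y = xgcd(a, b)
--     D = a * a + b * b
--     if D == 0:
--         return (g, x, y)
--     N = b * x - a * y
--     if N >= 0:
--         k = (2 * N + D - 1) // (2 * D)
--     else:
--         k = -((-2 * N + D - 1) // (2 * D))
--     return (g, x - k * b, y + k * a)
-- ===== Notes on version B (the rewrite author's own statement) =====
-- stated objective: simpler
-- what changed: The two step-by-step adjustment while-loops are replaced by a closed-form choice of the shift count k: with D=a*a+b*b and N=b*x-a*y, k is N/D rounded to the nearest integer with halves rounded toward zero (computed in exact integer arithmetic), applied once as (x-k*b, y+k*a); the a=b=0 case returns unchanged.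
import Mathlib
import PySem

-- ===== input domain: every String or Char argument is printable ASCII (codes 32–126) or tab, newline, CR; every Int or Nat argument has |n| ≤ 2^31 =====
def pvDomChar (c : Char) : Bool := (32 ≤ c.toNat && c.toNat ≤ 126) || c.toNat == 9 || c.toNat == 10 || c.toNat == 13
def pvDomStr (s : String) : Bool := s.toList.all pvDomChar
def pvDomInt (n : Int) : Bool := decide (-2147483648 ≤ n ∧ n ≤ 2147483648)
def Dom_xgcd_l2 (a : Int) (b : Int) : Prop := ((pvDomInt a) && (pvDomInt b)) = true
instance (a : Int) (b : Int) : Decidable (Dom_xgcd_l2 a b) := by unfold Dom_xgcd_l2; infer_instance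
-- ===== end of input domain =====

-- B replaces A's two step-by-step adjustment loops by a closed-form rounded quotient (simpler, and
-- constant-time after the gcd); the shared helper xgcd is kept unchanged.

-- ===== PORT A =====
-- helper `xgcd`: the while loop of the Python helper, one recursive step per iteration.
-- Termination: |n| strictly decreases (Python % takes the divisor's sign, so |b % n| < |n|).
theorem pvModNatAbsLt (b n : Int) (h : n ≠ 0) :
    (PySem.Int.mod b n).natAbs < n.natAbs := by
  rcases lt_or_gt_of_ne h with hn | hn
  · have h1 := (PySem.Int.mod_neg_bounds (a := b) hn).1
    have h2 := (PySem.Int.mod_neg_bounds (a := b) hn).2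
    omega
  · have h1 := PySem.Int.mod_nonneg (a := b) hn
    have h2 := PySem.Int.mod_lt (a := b) hn
    omega

def xgcdLoop (b n x0 x1 y0 y1 : Int) : Int × Int × Int :=
  if h : n = 0 then (b, x0, y0)
  else
    let q := PySem.Int.floordiv b n
    xgcdLoop n (PySem.Int.mod b n) x1 (x0 - q * x1) y1 (y0 - q * y1)
termination_by n.natAbs
decreasing_by exact pvModNatAbsLt b n h

def xgcd (b : Int) (n : Int) : Int × Int × Int :=
  let r := xgcdLoop b n 1 0 0 1
  if r.1 > 0 then r else (-r.1, -r.2.1, -r.2.2)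

-- A's first while loop.  Termination: the l2 norm strictly decreases while the guard holds.
def adjLoop1 (a b x y : Int) : Int × Int :=
  if h : x ^ 2 + y ^ 2 > (x - b) ^ 2 + (y + a) ^ 2 then adjLoop1 a b (x - b) (y + a)
  else (x, y)
termination_by (x ^ 2 + y ^ 2).toNat
decreasing_by
  have h0 : (0:Int) ≤ (x - b) ^ 2 + (y + a) ^ 2 := by positivity
  omega

-- A's second while loop.
def adjLoop2 (a b x y : Int) : Int × Int :=
  if h : x ^ 2 + y ^ 2 > (x + b) ^ 2 + (y - a) ^ 2 then adjLoop2 a b (x + b) (y - a)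
  else (x, y)
termination_by (x ^ 2 + y ^ 2).toNat
decreasing_by
  have h0 : (0:Int) ≤ (x + b) ^ 2 + (y - a) ^ 2 := by positivity
  omega

def xgcd_l2 (a : Int) (b : Int) : Int × Int × Int :=
  let r := xgcd a b
  let p := adjLoop1 a b r.2.1 r.2.2
  let p2 := adjLoop2 a b p.1 p.2
  (r.1, p2.1, p2.2)

-- ===== PORT B =====
def xgcd_l2_alt (a : Int) (b : Int) : Int × Int × Int :=
  let r := xgcd a b
  let g := r.1; let x := r.2.1; let y := r.2.2
  let D := a * a + b * b
  if D = 0 then (g, x, y)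
  else
    let N := b * x - a * y
    let k := if N ≥ 0 then PySem.Int.floordiv (2 * N + D - 1) (2 * D)
             else -(PySem.Int.floordiv (-2 * N + D - 1) (2 * D))
    (g, x - k * b, y + k * a)

-- ===== PRECONDITION & SPEC =====
def Spec_xgcd_l2 (a : Int) (b : Int) (out : Int × Int × Int) : Prop := out = xgcd_l2_alt a b
instance (a : Int) (b : Int) (out : Int × Int × Int) : Decidable (Spec_xgcd_l2 a b out) := by unfold Spec_xgcd_l2; infer_instance

-- ===== CLAIM (what is proved, stated in full; the proofs are below) =====
def Claim_equal_xgcd_l2 : Prop := ∀ (a : Int) (b : Int), Dom_xgcd_l2 a b → Spec_xgcd_l2 a b (xgcd_l2 a b)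

-- ===== LEMMAS AND PROOFS =====

-- loop 1 does nothing when 2(bx - ay) ≤ a² + b²
theorem adjLoop1_stop (a b x y : Int) (h : 2 * (b * x - a * y) ≤ a * a + b * b) :
    adjLoop1 a b x y = (x, y) := by
  rw [adjLoop1]
  rw [dif_neg]
  nlinarith [sq_nonneg a, sq_nonneg b]

-- loop 2 does nothing when -(a² + b²) ≤ 2(bx - ay)
theorem adjLoop2_stop (a b x y : Int) (h : -(a * a + b * b) ≤ 2 * (b * x - a * y)) :
    adjLoop2 a b x y = (x, y) := by
  rw [adjLoop2]
  rw [dif_neg]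
  nlinarith [sq_nonneg a, sq_nonneg b]

-- loop 1 under the guard: closed form for the number of steps, by induction on the loop measure
theorem adjLoop1_runAux (a b : Int) (hD : 0 < a * a + b * b) : ∀ (n : Nat) (x y : Int),
    (2 * (b * x - a * y)).toNat ≤ n → 2 * (b * x - a * y) > a * a + b * b →
    adjLoop1 a b x y =
      (x - PySem.Int.floordiv (2 * (b * x - a * y) + (a * a + b * b) - 1) (2 * (a * a + b * b)) * b,
       y + PySem.Int.floordiv (2 * (b * x - a * y) + (a * a + b * b) - 1) (2 * (a * a + b * b)) * a) := by
  intro n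
  induction n with
  | zero => intro x y hle h; omega
  | succ n ih =>
    intro x y hle h
    rw [adjLoop1, dif_pos (by nlinarith)]
    have hN' : b * (x - b) - a * (y + a) = (b * x - a * y) - (a * a + b * b) := by ring
    by_cases h2 : 2 * (b * (x - b) - a * (y + a)) > a * a + b * b
    · have hle' : (2 * (b * (x - b) - a * (y + a))).toNat ≤ n := by
        rw [hN']; omega
      rw [ih (x - b) (y + a) hle' h2]
      have hk' := (PySem.Int.floordiv_eq_iff_of_pos (a := 2 * (b * (x - b) - a * (y + a)) + (a * a + b * b) - 1)
          (b := 2 * (a * a + b * b)) (by omega)).mp rfl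
      have hk : PySem.Int.floordiv (2 * (b * x - a * y) + (a * a + b * b) - 1) (2 * (a * a + b * b))
          = PySem.Int.floordiv (2 * (b * (x - b) - a * (y + a)) + (a * a + b * b) - 1) (2 * (a * a + b * b)) + 1 := by
        rw [PySem.Int.floordiv_eq_iff_of_pos (by omega)]
        constructor <;> nlinarith [hk'.1, hk'.2]
      rw [hk]; simp only [Prod.mk.injEq]; exact ⟨by ring, by ring⟩
    · rw [not_lt] at h2
      rw [adjLoop1_stop a b (x - b) (y + a) h2]
      have hk : PySem.Int.floordiv (2 * (b * x - a * y) + (a * a + b * b) - 1) (2 * (a * a + b * b)) = 1 := by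
        rw [PySem.Int.floordiv_eq_iff_of_pos (by omega)]
        constructor <;> nlinarith
      rw [hk]; simp only [Prod.mk.injEq]; exact ⟨by ring, by ring⟩

theorem adjLoop1_run (a b x y : Int) (hD : 0 < a * a + b * b)
    (h : 2 * (b * x - a * y) > a * a + b * b) :
    adjLoop1 a b x y =
      (x - PySem.Int.floordiv (2 * (b * x - a * y) + (a * a + b * b) - 1) (2 * (a * a + b * b)) * b,
       y + PySem.Int.floordiv (2 * (b * x - a * y) + (a * a + b * b) - 1) (2 * (a * a + b * b)) * a) :=
  adjLoop1_runAux a b hD (2 * (b * x - a * y)).toNat x y le_rfl h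

-- loop 2 under the guard (the mirror image of loop 1)
theorem adjLoop2_runAux (a b : Int) (hD : 0 < a * a + b * b) : ∀ (n : Nat) (x y : Int),
    (-(2 * (b * x - a * y))).toNat ≤ n → 2 * (b * x - a * y) < -(a * a + b * b) →
    adjLoop2 a b x y =
      (x + PySem.Int.floordiv (-2 * (b * x - a * y) + (a * a + b * b) - 1) (2 * (a * a + b * b)) * b,
       y - PySem.Int.floordiv (-2 * (b * x - a * y) + (a * a + b * b) - 1) (2 * (a * a + b * b)) * a) := by
  intro n
  induction n with
  | zero => intro x y hle h; omega
  | succ n ih =>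
    intro x y hle h
    rw [adjLoop2, dif_pos (by nlinarith)]
    have hN' : b * (x + b) - a * (y - a) = (b * x - a * y) + (a * a + b * b) := by ring
    by_cases h2 : 2 * (b * (x + b) - a * (y - a)) < -(a * a + b * b)
    · have hle' : (-(2 * (b * (x + b) - a * (y - a)))).toNat ≤ n := by
        rw [hN']; omega
      rw [ih (x + b) (y - a) hle' h2]
      have hk' := (PySem.Int.floordiv_eq_iff_of_pos (a := -2 * (b * (x + b) - a * (y - a)) + (a * a + b * b) - 1)
          (b := 2 * (a * a + b * b)) (by omega)).mp rfl
      have hk : PySem.Int.floordiv (-2 * (b * x - a * y) + (a * a + b * b) - 1) (2 * (a * a + b * b))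
          = PySem.Int.floordiv (-2 * (b * (x + b) - a * (y - a)) + (a * a + b * b) - 1) (2 * (a * a + b * b)) + 1 := by
        rw [PySem.Int.floordiv_eq_iff_of_pos (by omega)]
        constructor <;> nlinarith [hk'.1, hk'.2]
      rw [hk]; simp only [Prod.mk.injEq]; exact ⟨by ring, by ring⟩
    · rw [not_lt] at h2
      rw [adjLoop2_stop a b (x + b) (y - a) (by linarith)]
      have hk : PySem.Int.floordiv (-2 * (b * x - a * y) + (a * a + b * b) - 1) (2 * (a * a + b * b)) = 1 := by
        rw [PySem.Int.floordiv_eq_iff_of_pos (by omega)]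
        constructor <;> nlinarith
      rw [hk]; simp only [Prod.mk.injEq]; exact ⟨by ring, by ring⟩

theorem adjLoop2_run (a b x y : Int) (hD : 0 < a * a + b * b)
    (h : 2 * (b * x - a * y) < -(a * a + b * b)) :
    adjLoop2 a b x y =
      (x + PySem.Int.floordiv (-2 * (b * x - a * y) + (a * a + b * b) - 1) (2 * (a * a + b * b)) * b,
       y - PySem.Int.floordiv (-2 * (b * x - a * y) + (a * a + b * b) - 1) (2 * (a * a + b * b)) * a) :=
  adjLoop2_runAux a b hD (-(2 * (b * x - a * y))).toNat x y le_rfl h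

-- ===== VERDICT (by name: the statement is the Claim_ definition above) =====
theorem xgcd_l2_spec : Claim_equal_xgcd_l2 := by
  intro a b _
  unfold Spec_xgcd_l2 xgcd_l2 xgcd_l2_alt
  rcases hxy : xgcd a b with ⟨g, x, y⟩
  simp only
  by_cases hD : a * a + b * b = 0
  · have ha : a = 0 := by nlinarith [mul_self_nonneg a, mul_self_nonneg b]
    have hb : b = 0 := by nlinarith [mul_self_nonneg a, mul_self_nonneg b]
    rw [adjLoop1_stop a b x y (by rw [ha, hb]; ring_nf; rfl)]
    rw [adjLoop2_stop a b x y (by rw [ha, hb]; ring_nf; rfl)]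
    rw [if_pos hD]
  · have hD0 : 0 < a * a + b * b := by
      rcases lt_or_eq_of_le (by nlinarith [mul_self_nonneg a, mul_self_nonneg b] :
        (0:Int) ≤ a * a + b * b) with h | h
      · exact h
      · exact absurd h.symm hD
    rw [if_neg hD]
    by_cases h1 : 2 * (b * x - a * y) > a * a + b * b
    · -- loop 1 runs, loop 2 is a no-op; B takes the N ≥ 0 branch
      rw [adjLoop1_run a b x y hD0 h1]
      have hk := (PySem.Int.floordiv_eq_iff_of_pos (a := 2 * (b * x - a * y) + (a * a + b * b) - 1)
          (b := 2 * (a * a + b * b)) (by omega)).mp rfl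
      rw [adjLoop2_stop a b _ _ (by nlinarith [hk.2])]
      have hN : b * x - a * y ≥ 0 := by nlinarith
      rw [if_pos hN]
    · rw [not_lt] at h1
      by_cases h2 : 2 * (b * x - a * y) < -(a * a + b * b)
      · -- loop 1 is a no-op, loop 2 runs; B takes the N < 0 branch
        rw [adjLoop1_stop a b x y h1]
        rw [adjLoop2_run a b x y hD0 h2]
        have hN : ¬ (b * x - a * y ≥ 0) := by nlinarith
        rw [if_neg hN]
        simp only [Prod.mk.injEq]
        exact ⟨trivial, by ring, by ring⟩
      · -- both loops are no-ops; B picks k = 0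
        rw [not_lt] at h2
        rw [adjLoop1_stop a b x y h1, adjLoop2_stop a b x y h2]
        by_cases hN : b * x - a * y ≥ 0
        · rw [if_pos hN]
          have hk : PySem.Int.floordiv (2 * (b * x - a * y) + (a * a + b * b) - 1)
              (2 * (a * a + b * b)) = 0 := by
            rw [PySem.Int.floordiv_eq_iff_of_pos (by omega)]
            constructor <;> nlinarith
          rw [hk]
          simp only [Prod.mk.injEq]
          exact ⟨trivial, by ring, by ring⟩
        · rw [if_neg hN]
          rw [not_le] at hN
          have hk : PySem.Int.floordiv (-2 * (b * x - a * y) + (a * a + b * b) - 1)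
              (2 * (a * a + b * b)) = 0 := by
            rw [PySem.Int.floordiv_eq_iff_of_pos (by omega)]
            constructor <;> nlinarith
          rw [hk]
          simp only [Prod.mk.injEq]
          exact ⟨trivial, by ring, by ring⟩
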